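-- pv_equiv track=rewrite | github.com/sadielbartholomew/cf-standard-names-linguistics | analysis/final-ngram-network.py | generate_shells
-- ===== SOURCE A (Python) =====
-- LABELS_ON = True
--
-- def generate_shells(nodes):
--     """TODO."""
--     # DEFINE SHELLS! - shells are to be arranged according to n-gram word size
--     # whic is already identified as the node_colours
--     nodes_list_per_n = []
--     for i in range(1, 25):  # TODO UPDATE 1, 25 TO GET REL. RANGE NOT JUST MANUAL
--         i_shell = []
--         for id_n, n in nodes.items():
--             ngram, _ = n
--             # TODO make helper function for this calc, do often
--             if ngram.count(" ") + 1 == i:  # i.e. length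
--                 if LABELS_ON:
--                     i_shell.append(ngram)
--                 else:
--                     i_shell.append(id_n)
--
--         nodes_list_per_n.append(i_shell)
--
--     return nodes_list_per_n
-- ===== SOURCE B (Python) =====
-- LABELS_ON = True
--
-- def generate_shells(nodes):
--     """Single pass: bucket each node's label by word count, then emit shells 1..24."""
--     buckets = {}
--     for id_n, n in nodes.items():
--         ngram, _ = n
--         length = ngram.count(" ") + 1
--         buckets.setdefault(length, []).append(ngram if LABELS_ON else id_n)
--     return [buckets.get(i, []) for i in range(1, 25)]
-- ===== Notes on version B (the rewrite author's own statement) =====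
-- stated objective: faster
-- what changed: Replaces the 24 repeated scans of nodes.items() (one full rescan per shell length) with a single bucketing pass into a length-keyed dict followed by emitting the bucket for each length from 1 to 24.
import Mathlib
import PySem

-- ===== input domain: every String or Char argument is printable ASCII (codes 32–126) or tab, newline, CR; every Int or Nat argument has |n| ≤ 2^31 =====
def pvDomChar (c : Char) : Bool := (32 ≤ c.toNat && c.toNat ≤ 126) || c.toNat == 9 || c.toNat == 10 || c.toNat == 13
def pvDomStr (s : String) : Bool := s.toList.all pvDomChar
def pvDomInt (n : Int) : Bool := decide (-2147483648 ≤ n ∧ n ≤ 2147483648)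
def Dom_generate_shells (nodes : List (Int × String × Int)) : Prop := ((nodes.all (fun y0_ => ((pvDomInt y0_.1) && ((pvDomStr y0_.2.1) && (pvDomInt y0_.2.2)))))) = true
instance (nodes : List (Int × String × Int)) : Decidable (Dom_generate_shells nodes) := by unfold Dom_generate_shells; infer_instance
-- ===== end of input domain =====

-- B replaces A's 24 repeated scans of nodes.items() with one bucketing pass plus a 24-step emit (objective: faster, constant-factor).

def LABELS_ON : Bool := true

-- ===== PORT A =====
-- A iterates i = 1..24 and for each i rescans nodes.items(), collecting the ngrams of word-length i.
-- The 'else: i_shell.append(id_n)' branch is dead code here (LABELS_ON is the module constant True) and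
-- is untypeable under the convention (it would put an int into a list of strings), so the if LABELS_ON
-- guard appends the ngram and its else arm leaves the shell unchanged in no reachable case.
def generate_shells (nodes : List (Int × String × Int)) : List (List String) :=
  (PySem.List.pyRange 1 25 1).foldl (fun nodes_list_per_n i =>
    nodes_list_per_n ++ [(PySem.Dict.ofList nodes).items.foldl (fun i_shell p =>
      if ((PySem.Str.count p.2.1 " " : Int) + 1 = i) then
        (if LABELS_ON then i_shell ++ [p.2.1] else i_shell)
      else i_shell) []]) []

-- ===== PORT B =====
def generate_shells_alt (nodes : List (Int × String × Int)) : List (List String) :=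
  let buckets := (PySem.Dict.ofList nodes).items.foldl
    (fun (b : PySem.Dict Int (List String)) p =>
      b.modify ((PySem.Str.count p.2.1 " " : Int) + 1) [] (fun l => l ++ [if LABELS_ON then p.2.1 else p.2.1]))
    PySem.Dict.empty
  (PySem.List.pyRange 1 25 1).map (fun i => buckets.getD i [])

-- ===== PRECONDITION & SPEC =====
def Spec_generate_shells (nodes : List (Int × String × Int)) (out : List (List String)) : Prop := out = generate_shells_alt nodes
instance (nodes : List (Int × String × Int)) (out : List (List String)) : Decidable (Spec_generate_shells nodes out) := by unfold Spec_generate_shells; infer_instance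

-- ===== CLAIM (what is proved, stated in full; the proofs are below) =====
def Claim_equal_generate_shells : Prop := ∀ (nodes : List (Int × String × Int)), Dom_generate_shells nodes → Spec_generate_shells nodes (generate_shells nodes)

-- ===== LEMMAS AND PROOFS =====

-- A's inner loop over the items, for a fixed shell index i, is a filter-then-map.
theorem inner_shell (l : List (Int × String × Int)) (i : Int) (acc : List String) :
    (l.foldl (fun i_shell p =>
        if ((PySem.Str.count p.2.1 " " : Int) + 1 = i) then
          (if LABELS_ON then i_shell ++ [p.2.1] else i_shell)
        else i_shell) acc)
    = acc ++ (l.filter (fun p => decide ((PySem.Str.count p.2.1 " " : Int) + 1 = i))).map (fun p => p.2.1) := by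
  induction l generalizing acc with
  | nil => simp
  | cons p l ih =>
    rw [List.foldl_cons, List.filter_cons]
    by_cases h : ((PySem.Str.count p.2.1 " " : Int) + 1 = i)
    · subst h
      rw [ih]
      simp [LABELS_ON]
    · rw [if_neg h, if_neg (by simpa using h), ih]

-- B's bucket at key i, after folding any item list l onto any dict b, is b's bucket followed by
-- the labels of l's items of word-length i, in l's order.
theorem bucket_getD (l : List (Int × String × Int)) (b : PySem.Dict Int (List String)) (i : Int) :
    (l.foldl (fun (b : PySem.Dict Int (List String)) p =>
        b.modify ((PySem.Str.count p.2.1 " " : Int) + 1) [] (fun l => l ++ [if LABELS_ON then p.2.1 else p.2.1]))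
      b).getD i []
    = b.getD i [] ++ (l.filter (fun p => decide ((PySem.Str.count p.2.1 " " : Int) + 1 = i))).map (fun p => p.2.1) := by
  induction l generalizing b with
  | nil => simp
  | cons p l ih =>
    rw [List.foldl_cons, List.filter_cons, ih, PySem.Dict.getD_modify]
    by_cases h : ((PySem.Str.count p.2.1 " " : Int) + 1 = i)
    · subst h
      simp [LABELS_ON]
    · rw [if_neg (fun hh => h hh.symm), if_neg (by simpa using h)]

theorem generate_shells_spec : Claim_equal_generate_shells := by
  intro nodes _
  unfold Spec_generate_shells generate_shells generate_shells_alt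
  rw [PySem.List.foldl_append_singleton_eq_map]
  simp only [List.nil_append]
  apply List.map_congr_left
  intro i _
  rw [bucket_getD, inner_shell]
  simp [PySem.Dict.getD_empty]
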